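-- pv_equiv track=rewrite | github.com/EcodiaTate/site_backend | core/user_guard.py | _extract_bearer
-- ===== SOURCE A (Python) =====
-- from typing import Optional
--
-- def _looks_like_jwt(s: str) -> bool:
--     return isinstance(s, str) and s.count(".") == 2
--
-- def _extract_bearer(authorization: Optional[str]) -> Optional[str]:
--     """
--     Accepts typical auth header variants:
--       - "Bearer <token>"
--       - "bearer <token>"
--       - "JWT <token>"
--       - "Token <token>"
--     """
--     if not authorization:
--         return None
--     auth = authorization.strip()
--     if not auth:
--         return None
--     lower = auth.lower()
--     for prefix in ("bearer ", "jwt ", "token "):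
--         if lower.startswith(prefix):
--             return auth[len(prefix) :].strip()
--     # If header has no prefix but *is* a JWT, accept it (some proxies forward raw token)
--     if _looks_like_jwt(auth):
--         return auth
--     return None
-- ===== SOURCE B (Python) =====
-- from typing import Optional
--
-- _SCHEMES = {"bearer", "jwt", "token"}
--
--
-- def _extract_bearer(authorization: Optional[str]) -> Optional[str]:
--     if not authorization:
--         return None
--     auth = authorization.strip()
--     if not auth:
--         return None
--     i = auth.find(" ")
--     if i != -1 and auth[:i].lower() in _SCHEMES:
--         return auth[i + 1:].strip()
--     return auth if auth.count(".") == 2 else None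
-- ===== Notes on version B (the rewrite author's own statement) =====
-- stated objective: simpler
-- what changed: B replaces A's loop over three lowered-prefix startswith tests (each with its own slice length) by locating the first space once with find, classifying the word before it via membership in a scheme set, and slicing the token after that single index; the JWT fallback becomes a plain dot-count conditional expression.
import Mathlib
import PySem

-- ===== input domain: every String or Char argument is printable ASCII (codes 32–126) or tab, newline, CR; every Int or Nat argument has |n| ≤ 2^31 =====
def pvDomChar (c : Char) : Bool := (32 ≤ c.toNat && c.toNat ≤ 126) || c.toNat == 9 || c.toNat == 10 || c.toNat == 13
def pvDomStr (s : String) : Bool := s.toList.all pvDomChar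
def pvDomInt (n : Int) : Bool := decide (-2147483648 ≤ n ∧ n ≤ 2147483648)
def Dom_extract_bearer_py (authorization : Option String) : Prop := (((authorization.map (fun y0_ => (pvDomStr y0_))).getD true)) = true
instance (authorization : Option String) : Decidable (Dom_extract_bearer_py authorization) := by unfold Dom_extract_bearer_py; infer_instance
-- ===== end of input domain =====

-- B replaces A's prefix-by-prefix startswith loop by locating the first space once and classifying
-- the scheme word by set membership (objective: simpler decomposition; same semantics).

-- ===== PORT A =====
def pv_looks_like_jwt (s : String) : Bool := PySem.Str.count s "." == 2

def extract_bearer_py (authorization : Option String) : Option String :=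
  match authorization with
  | none => none
  | some a =>
    if a = "" then none
    else
      let auth := PySem.Str.strip a
      if auth = "" then none
      else
        let lower := PySem.Str.lower auth
        if PySem.Str.startswith lower "bearer " then
          some (PySem.Str.strip (PySem.Str.slice auth (some 7) none))
        else if PySem.Str.startswith lower "jwt " then
          some (PySem.Str.strip (PySem.Str.slice auth (some 4) none))
        else if PySem.Str.startswith lower "token " then
          some (PySem.Str.strip (PySem.Str.slice auth (some 6) none))
        else if pv_looks_like_jwt auth then some auth
        else none

-- ===== PORT B =====
def pv_schemes : PySem.Set String := PySem.Set.ofList ["bearer", "jwt", "token"]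

def extract_bearer_py_alt (authorization : Option String) : Option String :=
  match authorization with
  | none => none
  | some a =>
    if a = "" then none
    else
      let auth := PySem.Str.strip a
      if auth = "" then none
      else
        let i := PySem.Str.find auth " "
        if (i != -1) && PySem.Set.contains pv_schemes (PySem.Str.lower (PySem.Str.slice auth none (some i))) then
          some (PySem.Str.strip (PySem.Str.slice auth (some (i + 1)) none))
        else if PySem.Str.count auth "." == 2 then some auth
        else none

-- ===== PRECONDITION & SPEC =====
def Spec_extract_bearer_py (authorization : Option String) (out : Option String) : Prop := out = extract_bearer_py_alt authorization
instance (authorization : Option String) (out : Option String) : Decidable (Spec_extract_bearer_py authorization out) := by unfold Spec_extract_bearer_py; infer_instance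

-- ===== CLAIM (what is proved, stated in full; the proofs are below) =====
def Claim_equal_extract_bearer_py : Prop := ∀ (authorization : Option String), Dom_extract_bearer_py authorization → Spec_extract_bearer_py authorization (extract_bearer_py authorization)

-- ===== LEMMAS AND PROOFS =====

theorem pv_lowerChar_eq_space (c : Char) : PySem.Chars.lowerChar c = ' ' ↔ c = ' ' := by
  unfold PySem.Chars.lowerChar
  split_ifs with h
  · simp [PySem.Chars.isupper, Char.le_def] at h
    obtain ⟨ha, hz⟩ := h
    rw [UInt32.le_iff_toNat_le] at ha hz
    have hb : 65 ≤ c.toNat ∧ c.toNat ≤ 90 := ⟨ha, hz⟩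
    constructor
    · intro he
      exfalso
      have h2 := congrArg Char.toNat he
      rw [Char.toNat_ofNat, if_pos (Or.inl (by omega : c.toNat + 32 < 0xd800))] at h2
      have h32 : Char.toNat ' ' = 32 := rfl
      rw [h32] at h2
      omega
    · intro he
      subst he
      exact absurd hb (by decide)
  · simp

theorem pv_find_go_space (cs : List Char) : ∀ (k : Nat),
    PySem.Chars.find.go [' '] cs k =
      if ' ' ∈ cs then ((k + (cs.takeWhile (fun c => c != ' ')).length : Nat) : Int) else -1 := by
  induction cs with
  | nil => intro k; simp [PySem.Chars.find.go]
  | cons c t ih =>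
    intro k
    by_cases hc : c = ' '
    · subst hc
      simp [PySem.Chars.find.go, List.isPrefixOf]
    · have hpre : List.isPrefixOf [' '] (c :: t) = false := by
        simp [List.isPrefixOf, Ne.symm hc]
      rw [PySem.Chars.find.go]
      rw [hpre]
      simp only [Bool.false_eq_true, if_false, ih (k + 1)]
      have htw : (c :: t).takeWhile (fun c => c != ' ') = c :: t.takeWhile (fun c => c != ' ') := by
        simp [hc]
      rw [htw]
      by_cases hm : ' ' ∈ t
      · simp [hm, List.mem_cons, Ne.symm hc]
        omega
      · simp [hm, List.mem_cons, Ne.symm hc]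

-- if neither v nor u contains a space, 'v ++ " "' prefixes 'u ++ " " ++ r' exactly when v = u
theorem pv_prefix_space : ∀ (v u r : List Char), ' ' ∉ v → ' ' ∉ u →
    ((v ++ [' ']) <+: (u ++ ' ' :: r) ↔ v = u) := by
  intro v
  induction v with
  | nil =>
    intro u r _ hu
    cases u with
    | nil => simp
    | cons c u' =>
      simp only [List.nil_append, List.cons_append, List.cons_prefix_cons]
      constructor
      · rintro ⟨he, _⟩
        exact absurd (by rw [he]; exact List.mem_cons_self : ' ' ∈ c :: u') hu
      · intro h; exact absurd h (by simp)
  | cons a v' ih =>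
    intro u r hv hu
    cases u with
    | nil =>
      simp only [List.nil_append, List.cons_append, List.cons_prefix_cons]
      constructor
      · rintro ⟨he, _⟩
        exact absurd (by rw [← he]; exact List.mem_cons_self : ' ' ∈ a :: v') hv
      · intro h; exact absurd h (by simp)
    | cons c u' =>
      simp only [List.cons_append, List.cons_prefix_cons]
      have hv' : ' ' ∉ v' := fun h => hv (List.mem_cons_of_mem _ h)
      have hu' : ' ' ∉ u' := fun h => hu (List.mem_cons_of_mem _ h)
      rw [ih u' r hv' hu']
      constructor
      · rintro ⟨h1, h2⟩; rw [h1, h2]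
      · intro h; injection h with h1 h2; exact ⟨h1, h2⟩

theorem pv_no_space_startswith (cs w : List Char) (hw : ' ' ∈ w) (h : ' ' ∉ cs) :
    PySem.Chars.startswith (PySem.Chars.lower cs) w = false := by
  by_contra hb
  rw [Bool.not_eq_false, PySem.Chars.startswith_iff] at hb
  have : ' ' ∈ PySem.Chars.lower cs := hb.mem hw
  simp only [PySem.Chars.lower, List.mem_map] at this
  obtain ⟨c, hc, he⟩ := this
  exact h ((pv_lowerChar_eq_space c).mp he ▸ hc)

theorem pv_no_space_lower (w : List Char) (hw : ' ' ∉ w) :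
    ' ' ∉ w.map PySem.Chars.lowerChar := by
  intro h
  simp only [List.mem_map] at h
  obtain ⟨c, hc, he⟩ := h
  exact hw ((pv_lowerChar_eq_space c).mp he ▸ hc)

-- the heart of the equivalence: on any (already stripped, nonempty is irrelevant) string,
-- A's three startswith tests against the lowered header decide exactly like B's
-- find-first-space + scheme-set membership, with identical results in every branch.
set_option maxHeartbeats 1000000 in
theorem pv_main (s : String) :
    (if PySem.Str.startswith (PySem.Str.lower s) "bearer " then
       some (PySem.Str.strip (PySem.Str.slice s (some 7) none))
     else if PySem.Str.startswith (PySem.Str.lower s) "jwt " then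
       some (PySem.Str.strip (PySem.Str.slice s (some 4) none))
     else if PySem.Str.startswith (PySem.Str.lower s) "token " then
       some (PySem.Str.strip (PySem.Str.slice s (some 6) none))
     else if pv_looks_like_jwt s then some s else none)
    =
    (if (PySem.Str.find s " " != -1) && PySem.Set.contains pv_schemes (PySem.Str.lower (PySem.Str.slice s none (some (PySem.Str.find s " ")))) then
       some (PySem.Str.strip (PySem.Str.slice s (some (PySem.Str.find s " " + 1)) none))
     else if PySem.Str.count s "." == 2 then some s else none) := by
  have hfind : PySem.Str.find s " " =
      (if ' ' ∈ s.toList then (((s.toList.takeWhile (fun c => c != ' ')).length : Nat) : Int) else -1) := by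
    rw [PySem.Str.find_eq]
    show PySem.Chars.find.go [' '] s.toList 0 = _
    rw [pv_find_go_space s.toList 0]
    simp
  by_cases hsp : ' ' ∈ s.toList
  · -- there is a first space: decompose s.toList = w ++ ' ' :: r
    set w := s.toList.takeWhile (fun c => c != ' ') with hw_def
    have hwmem : ' ' ∉ w := by
      intro h
      have := List.mem_takeWhile_imp h
      simp at this
    have hd_ne : s.toList.dropWhile (fun c => c != ' ') ≠ [] := by
      intro hnil
      have := List.takeWhile_append_dropWhile (p := fun c => c != ' ') (l := s.toList)
      rw [hnil, List.append_nil] at this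
      apply hwmem
      rw [hw_def, this]
      exact hsp
    obtain ⟨d, r, hd⟩ : ∃ d r, s.toList.dropWhile (fun c => c != ' ') = d :: r := by
      cases hdw : s.toList.dropWhile (fun c => c != ' ') with
      | nil => exact absurd hdw hd_ne
      | cons d r => exact ⟨d, r, rfl⟩
    have hdsp : d = ' ' := by
      have hh := List.head_dropWhile_not (fun c => c != ' ') hd_ne
      have h2 : (s.toList.dropWhile (fun c => c != ' ')).head hd_ne = d := by
        simp [hd]
      rw [h2] at hh
      simpa using hh
    subst hdsp
    have hcs : s.toList = w ++ ' ' :: r := by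
      conv_lhs => rw [← List.takeWhile_append_dropWhile (p := fun c => c != ' ') (l := s.toList)]
      rw [hd]
    have hfind' : PySem.Str.find s " " = ((w.length : Nat) : Int) := by rw [hfind, if_pos hsp]
    -- the scheme word B examines, as a char list
    have hslice : (PySem.Str.lower (PySem.Str.slice s none (some (PySem.Str.find s " ")))).toList
        = w.map PySem.Chars.lowerChar := by
      rw [PySem.Str.toList_lower, PySem.Str.toList_slice, hfind']
      show PySem.Chars.lower (PySem.List.slice s.toList none (some ((w.length : Nat) : Int))) = _
      rw [PySem.List.slice_to s.toList (by positivity)]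
      rw [Int.toNat_natCast, hcs, List.take_left]
      rfl
    -- A's tests, rewritten through the decomposition
    have hlow : (PySem.Str.lower s).toList = w.map PySem.Chars.lowerChar ++ ' ' :: r.map PySem.Chars.lowerChar := by
      rw [PySem.Str.toList_lower]
      show s.toList.map PySem.Chars.lowerChar = _
      rw [hcs, List.map_append, List.map_cons]
      simp only [show PySem.Chars.lowerChar ' ' = ' ' from by decide]
    have hmaplow : ' ' ∉ w.map PySem.Chars.lowerChar := pv_no_space_lower w hwmem
    have htest : ∀ (q p : String), q.toList = p.toList ++ [' '] → ' ' ∉ p.toList →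
        PySem.Str.startswith (PySem.Str.lower s) q = decide (w.map PySem.Chars.lowerChar = p.toList) := by
      intro q p hps hp
      rw [PySem.Str.startswith_eq]
      show PySem.Chars.startswith (PySem.Str.lower s).toList q.toList = _
      rw [hps, hlow]
      rcases hb : PySem.Chars.startswith (w.map PySem.Chars.lowerChar ++ ' ' :: r.map PySem.Chars.lowerChar) (p.toList ++ [' ']) with _ | _
      · rw [eq_comm, decide_eq_false_iff_not]
        intro he
        have hpref := (pv_prefix_space p.toList (w.map PySem.Chars.lowerChar) (r.map PySem.Chars.lowerChar) hp hmaplow).mpr he.symm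
        have hsw := (PySem.Chars.startswith_iff _ _).mpr hpref
        rw [hb] at hsw
        exact Bool.false_ne_true hsw
      · rw [eq_comm, decide_eq_true_iff]
        rw [PySem.Chars.startswith_iff] at hb
        exact ((pv_prefix_space p.toList (w.map PySem.Chars.lowerChar) (r.map PySem.Chars.lowerChar) hp hmaplow).mp hb).symm
    have hb1 := htest "bearer " "bearer" (by decide) (by decide)
    have hb2 := htest "jwt " "jwt" (by decide) (by decide)
    have hb3 := htest "token " "token" (by decide) (by decide)
    -- B's membership test
    have hcont : PySem.Set.contains pv_schemes (PySem.Str.lower (PySem.Str.slice s none (some (PySem.Str.find s " "))))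
        = (decide (w.map PySem.Chars.lowerChar = "bearer".toList)
           || (decide (w.map PySem.Chars.lowerChar = "jwt".toList)
           || decide (w.map PySem.Chars.lowerChar = "token".toList))) := by
      have hsch : pv_schemes = ["bearer", "jwt", "token"] := by decide
      rw [hsch]
      simp only [PySem.Set.contains, List.contains_eq_mem, List.mem_cons, List.not_mem_nil,
        or_false, ← String.toList_inj, hslice]
      simp [Bool.decide_or]
      rfl
    by_cases h1 : w.map PySem.Chars.lowerChar = "bearer".toList
    · have hn : w.length = 6 := by
        have := congrArg List.length h1; simpa using this
      rw [hb1, decide_eq_true h1, hcont, decide_eq_true h1, hfind', hn]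
      norm_num
    · by_cases h2 : w.map PySem.Chars.lowerChar = "jwt".toList
      · have hn : w.length = 3 := by
          have := congrArg List.length h2; simpa using this
        rw [hb1, hb2, decide_eq_false h1, decide_eq_true h2, hcont, decide_eq_false h1, decide_eq_true h2, hfind', hn]
        norm_num
      · by_cases h3 : w.map PySem.Chars.lowerChar = "token".toList
        · have hn : w.length = 5 := by
            have := congrArg List.length h3; simpa using this
          rw [hb1, hb2, hb3, decide_eq_false h1, decide_eq_false h2, decide_eq_true h3,
            hcont, decide_eq_false h1, decide_eq_false h2, decide_eq_true h3, hfind', hn]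
          norm_num
        · rw [hb1, hb2, hb3, decide_eq_false h1, decide_eq_false h2, decide_eq_false h3,
            hcont, decide_eq_false h1, decide_eq_false h2, decide_eq_false h3]
          simp only [Bool.false_eq_true, if_false, Bool.or_false, Bool.and_false]
          rfl
  · -- no space at all: B's guard is false, A's three startswith all fail
    have hfind' : PySem.Str.find s " " = -1 := by rw [hfind, if_neg hsp]
    have hA : ∀ (p : String), ' ' ∈ p.toList →
        PySem.Str.startswith (PySem.Str.lower s) p = false := by
      intro p hp
      rw [PySem.Str.startswith_eq]
      show PySem.Chars.startswith (PySem.Str.lower s).toList p.toList = false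
      rw [PySem.Str.toList_lower]
      exact pv_no_space_startswith s.toList p.toList hp hsp
    rw [hA "bearer " (by decide), hA "jwt " (by decide), hA "token " (by decide), hfind']
    simp only [Bool.false_eq_true, if_false, bne_self_eq_false, Bool.false_and]
    rfl

-- ===== VERDICT (by name: the statement is the Claim_ definition above) =====
theorem extract_bearer_py_spec : Claim_equal_extract_bearer_py := by
  intro authorization _
  unfold Spec_extract_bearer_py extract_bearer_py extract_bearer_py_alt
  cases authorization with
  | none => rfl
  | some a =>
    simp only
    by_cases h0 : a = ""
    · rw [if_pos h0, if_pos h0]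
    · rw [if_neg h0, if_neg h0]
      by_cases h1 : PySem.Str.strip a = ""
      · rw [if_pos h1, if_pos h1]
      · rw [if_neg h1, if_neg h1]
        exact pv_main (PySem.Str.strip a)
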